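-- pv_equiv track=rewrite | github.com/pymongo/python_leetcode | greedy/gas_station.py | brute_force_wrong_traverse
-- ===== SOURCE A (Python) =====
-- from typing import List, Tuple
--
-- def brute_force_wrong_traverse(gas: List[int], cost: List[int]) -> int:
--     gas_volume: int
--     station: int
--     next_station: int
--     stations_count = len(gas)
--     for i in range(stations_count):
--         # 给油箱加上出发点的油量
--         # FIXME 遍历顺序不是4->2->5，而是4->1->5->2(简单多了)
--         gas_volume = gas[i]
--         # 内层循环遍历len-1次，遍历的是线段而不是端点
--         for j in range(1, stations_count):
--             next_station = (i + j) % stations_count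
--             # next_station = (i+j)
--             # if next_station > stations_count:
--             #     next_station -= stations_count
--             # 遍历到最后一个(也就是出发点)时，不能重复加两次出发点的油量
--             # if next_station == i:
--             #     gas_volume -= cost[next_station]
--             # else:
--             #     gas_volume += gas[next_station] - cost[next_station]
--             gas_volume -= cost[next_station]
--             if gas_volume < 0:
--                 break
--             gas_volume += gas[next_station]
--         else:
--             # 如果内层for循环break了
--             return i
--     return -1
-- ===== SOURCE B (Python) =====
-- from typing import List
--
--
-- def brute_force_wrong_traverse(gas: List[int], cost: List[int]) -> int:
--     # Q[t] = (prefix sum of gas-cost before t) - cost[t].  Start i survives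
--     # A's n-1 partial-sum checks iff every later Q is >= Q[i] and every earlier
--     # Q shifted by the total net sum is >= Q[i]; check with suffix minima and a
--     # running prefix minimum.
--     q: List[int] = []
--     p = 0
--     for g, c in zip(gas, cost):
--         q.append(p - c)
--         p += g - c
--     total = p
--     n = len(q)
--     suf: List = [None] * (n + 1)
--     for t in range(n - 1, -1, -1):
--         suf[t] = q[t] if suf[t + 1] is None else min(q[t], suf[t + 1])
--     pm = None
--     for i, qi in enumerate(q):
--         c1 = suf[i + 1] is None or suf[i + 1] >= qi
--         c2 = pm is None or total + pm >= qi
--         if c1 and c2: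
--             return i
--         pm = qi if pm is None else min(pm, qi)
--     return -1
-- ===== Notes on version B (the rewrite author's own statement) =====
-- stated objective: alternative
-- what changed: Replaces the per-start circular re-simulation (inner loop per start) by a single-pass formulation: prefix sums turn each start's survival test into 'all later Q[t] >= Q[i] and all earlier Q[t]+total >= Q[i]', answered with a precomputed suffix-minimum array and a running prefix minimum.
-- outside the precondition, e.g. on brute_force_wrong_traverse([5], []): A returns 0, B returns -1
import Mathlib
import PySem

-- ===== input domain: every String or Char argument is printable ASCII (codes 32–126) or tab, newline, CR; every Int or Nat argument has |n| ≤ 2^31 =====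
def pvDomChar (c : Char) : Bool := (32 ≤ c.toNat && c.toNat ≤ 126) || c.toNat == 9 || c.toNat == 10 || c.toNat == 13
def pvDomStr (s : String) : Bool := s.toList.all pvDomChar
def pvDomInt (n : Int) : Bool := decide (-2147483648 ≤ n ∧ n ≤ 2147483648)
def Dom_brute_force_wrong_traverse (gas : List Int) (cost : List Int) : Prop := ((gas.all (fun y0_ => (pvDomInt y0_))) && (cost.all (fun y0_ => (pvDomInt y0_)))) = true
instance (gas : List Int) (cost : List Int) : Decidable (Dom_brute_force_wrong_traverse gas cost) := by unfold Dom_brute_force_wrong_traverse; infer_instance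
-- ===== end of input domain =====

-- B replaces A's per-start circular re-simulation by a single-pass alternative:
-- prefix sums plus suffix/prefix minima of Q[t] = P[t] - cost[t] answer each start's test.


-- ===== PORT A =====
-- inner for-loop: j counts up, fuel = remaining iterations; returns true iff no break
def aInner (gas cost : List Int) (n i : Nat) (vol : Int) (j : Nat) : Nat → Bool
  | 0 => true
  | fuel + 1 =>
    let t := (i + j) % n
    let v := vol - cost.getD t 0
    if v < 0 then false
    else aInner gas cost n i (v + gas.getD t 0) (j + 1) fuel

-- outer for-loop over starts i (fuel = n - i)
def aOuter (gas cost : List Int) (n i : Nat) : Nat → Int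
  | 0 => -1
  | fuel + 1 =>
    if aInner gas cost n i (gas.getD i 0) 1 (n - 1) then (i : Int)
    else aOuter gas cost n (i + 1) fuel

def brute_force_wrong_traverse (gas : List Int) (cost : List Int) : Int :=
  aOuter gas cost gas.length 0 gas.length

-- ===== PORT B =====
-- first loop of Source B: builds Q and the running prefix sum p (returned as total)
def qAndTotal : List (Int × Int) → Int → List Int × Int
  | [], p => ([], p)
  | (g, c) :: rest, p =>
    let r := qAndTotal rest (p + (g - c))
    ((p - c) :: r.1, r.2)

-- second loop of Source B: suffix minima, suf[n] = None
def sufList : List Int → List (Option Int)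
  | [] => [none]
  | q :: rest =>
    let s := sufList rest
    (some (match s.headD none with
           | none => q
           | some m => min q m)) :: s

-- third loop of Source B: first i passing both window-minimum checks
def bLoop : List Int → List (Option Int) → Int → Option Int → Nat → Int
  | [], _, _, _, _ => -1
  | q :: qs, suf, total, pm, i =>
    let c1 := match suf.headD none with
              | none => true
              | some m => decide (m ≥ q)
    let c2 := match pm with
              | none => true
              | some m => decide (total + m ≥ q)
    if c1 && c2 then (i : Int)
    else bLoop qs suf.tail total
           (some (match pm with | none => q | some m => min m q)) (i + 1)

def brute_force_wrong_traverse_alt (gas : List Int) (cost : List Int) : Int :=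
  let z := gas.zip cost
  let qt := qAndTotal z 0
  bLoop qt.1 (sufList qt.1).tail qt.2 none 0

-- ===== PRECONDITION & SPEC =====
-- Pre_ requires cost at least as long as gas: A indexes cost circularly and raises
-- IndexError whenever 2 <= len(gas) > len(cost); the one-station short-cost corner
-- (len(gas) = 1 > len(cost)), where A returns 0 without ever touching cost, is
-- excluded together with it.
def Pre_brute_force_wrong_traverse (gas : List Int) (cost : List Int) : Prop :=
  gas.length ≤ cost.length
instance (gas : List Int) (cost : List Int) : Decidable (Pre_brute_force_wrong_traverse gas cost) := by
  unfold Pre_brute_force_wrong_traverse; infer_instance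

def pvWitness_brute_force_wrong_traverse : List Int × List Int := ([1, 2, 3], [2, 1, 3])

def Spec_brute_force_wrong_traverse (gas : List Int) (cost : List Int) (out : Int) : Prop := out = brute_force_wrong_traverse_alt gas cost
instance (gas : List Int) (cost : List Int) (out : Int) : Decidable (Spec_brute_force_wrong_traverse gas cost out) := by unfold Spec_brute_force_wrong_traverse; infer_instance

-- ===== CLAIM (what is proved, stated in full; the proofs are below) =====
def Claim_equal_brute_force_wrong_traverse : Prop := ∀ (gas : List Int) (cost : List Int), Dom_brute_force_wrong_traverse gas cost → Pre_brute_force_wrong_traverse gas cost → Spec_brute_force_wrong_traverse gas cost (brute_force_wrong_traverse gas cost)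

-- ===== LEMMAS AND PROOFS =====

-- math-side abbreviations (proof only)
def gF (gas : List Int) (t : Nat) : Int := gas.getD t 0
def cF (cost : List Int) (t : Nat) : Int := cost.getD t 0
def dF (gas cost : List Int) (t : Nat) : Int := gF gas t - cF cost t
def PF (gas cost : List Int) (t : Nat) : Int := ((List.range t).map (dF gas cost)).sum
def QF (gas cost : List Int) (t : Nat) : Int := PF gas cost t - cF cost t

-- the common survival condition of start i, as a boolean
def condB (gas cost : List Int) (n i : Nat) : Bool :=
  decide ((∀ t, t < n → i < t → QF gas cost t ≥ QF gas cost i) ∧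
          (∀ t, t < i → PF gas cost n + QF gas cost t ≥ QF gas cost i))

-- the common "first index satisfying f" shape
def findFrom (f : Nat → Bool) (i : Nat) : Nat → Int
  | 0 => -1
  | fuel + 1 => if f i then (i : Int) else findFrom f (i + 1) fuel

-- straight-line tank check over a list of station indices
def chk (gas cost : List Int) (v : Int) : List Nat → Bool
  | [] => true
  | t :: ts =>
    let v' := v - cF cost t
    if v' < 0 then false else chk gas cost (v' + gF gas t) ts

theorem PF_succ (gas cost : List Int) (t : Nat) :
    PF gas cost (t + 1) = PF gas cost t + dF gas cost t := by
  simp [PF, List.range_succ]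

theorem aInner_eq_chk (gas cost : List Int) (n i : Nat) :
    ∀ (fuel : Nat) (vol : Int) (j : Nat),
      aInner gas cost n i vol j fuel
        = chk gas cost vol ((List.range' j fuel).map (fun u => (i + u) % n)) := by
  intro fuel
  induction fuel with
  | zero => intro vol j; simp [aInner, chk]
  | succ f ih =>
    intro vol j
    rw [List.range'_succ]
    simp only [aInner, chk, List.map_cons, cF, gF]
    split_ifs with h
    · rfl
    · exact ih _ _

theorem chk_append (gas cost : List Int) :
    ∀ (as bs : List Nat) (v : Int),
      chk gas cost v (as ++ bs)
        = (chk gas cost v as && chk gas cost (v + (as.map (dF gas cost)).sum) bs) := by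
  intro as
  induction as with
  | nil => intro bs v; simp [chk]
  | cons t ts ih =>
    intro bs v
    simp only [List.cons_append, chk]
    split_ifs with h
    · simp
    · rw [ih]
      congr 2
      simp [dF]
      ring

theorem chk_range' (gas cost : List Int) :
    ∀ (k a : Nat) (v : Int),
      chk gas cost v (List.range' a k)
        = decide (∀ t, a ≤ t → t < a + k → v + PF gas cost t - PF gas cost a ≥ cF cost t) := by
  intro k
  induction k with
  | zero => intro a v; simp [chk]; omega
  | succ k ih =>
    intro a v
    rw [List.range'_succ]
    simp only [chk]
    split_ifs with h
    · have : ¬ (∀ t, a ≤ t → t < a + (k + 1) → v + PF gas cost t - PF gas cost a ≥ cF cost t) := by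
        intro hall
        have := hall a le_rfl (by omega)
        simp at this
        omega
      simp [this]
    · rw [ih]
      have harr : ∀ t, v - cF cost t + gF gas t = v + dF gas cost t := by
        intro t; simp [dF]; ring
      rw [harr]
      apply decide_eq_decide.mpr
      constructor
      · intro hall t hat htk
        rcases Nat.eq_or_lt_of_le hat with rfl | hlt
        · simp; omega
        · have := hall t hlt (by omega)
          rw [PF_succ] at this
          omega
      · intro hall t hat htk
        have := hall t (by omega) (by omega)
        rw [PF_succ]
        omega

theorem sum_map_range' (gas cost : List Int) :
    ∀ (k a : Nat), ((List.range' a k).map (dF gas cost)).sum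
      = PF gas cost (a + k) - PF gas cost a := by
  intro k
  induction k with
  | zero => intro a; simp
  | succ k ih =>
    intro a
    rw [List.range'_succ]
    simp only [List.map_cons, List.sum_cons, ih (a + 1)]
    rw [show a + (k + 1) = a + 1 + k from by omega, PF_succ gas cost a]
    omega

theorem split_indices (n i : Nat) (hi : i < n) :
    (List.range' 1 (n - 1)).map (fun u => (i + u) % n)
      = List.range' (i + 1) (n - 1 - i) ++ List.range' 0 i := by
  have h1 : List.range' 1 (n - 1) = List.range' 1 (n - 1 - i) ++ List.range' (n - i) i := by
    have h := @List.range'_append 1 (n - 1 - i) i 1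
    rw [show 1 + 1 * (n - 1 - i) = n - i from by omega,
        show n - 1 - i + i = n - 1 from by omega] at h
    exact h.symm
  rw [h1, List.map_append]
  congr 1
  · apply List.ext_getElem
    · simp
    · intro m h1 h2
      have hm : m < n - 1 - i := by simpa using h2
      simp only [List.getElem_map, List.getElem_range']
      rw [Nat.mod_eq_of_lt (by omega)]
      omega
  · apply List.ext_getElem
    · simp
    · intro m h1 h2
      have hm : m < i := by simpa using h2
      simp only [List.getElem_map, List.getElem_range']
      rw [show i + (n - i + 1 * m) = n + m from by omega, Nat.add_mod_left,
          Nat.mod_eq_of_lt (by omega)]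
      omega

-- A's inner loop computes condB
theorem aInner_cond (gas cost : List Int) (n i : Nat) (hn : n = gas.length) (hi : i < n) :
    aInner gas cost n i (gas.getD i 0) 1 (n - 1) = condB gas cost n i := by
  rw [aInner_eq_chk, split_indices n i hi, chk_append, chk_range', chk_range',
      sum_map_range' gas cost (n - 1 - i) (i + 1)]
  rw [show i + 1 + (n - 1 - i) = n by omega]
  have hQ : ∀ t, QF gas cost t = PF gas cost t - cF cost t := fun t => rfl
  have hPi : PF gas cost (i + 1) = PF gas cost i + gF gas i - cF cost i := by
    rw [PF_succ]; simp [dF]; ring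
  have hgd : gas.getD i 0 = gF gas i := rfl
  rw [hgd]
  rw [← Bool.decide_and]
  unfold condB
  apply decide_eq_decide.mpr
  constructor
  · rintro ⟨ha, hb⟩
    constructor
    · intro t h1 h2
      have := ha t (by omega) (by omega)
      simp [QF]
      omega
    · intro t h1
      have := hb t (by omega) (by omega)
      simp [QF, PF] at *
      omega
  · rintro ⟨ha, hb⟩
    constructor
    · intro t h1 h2
      have := ha t (by omega) (by omega)
      simp [QF] at this
      omega
    · intro t h1 h2
      have := hb t (by omega)
      simp [QF, PF] at *
      omega

-- A's outer loop is findFrom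
theorem aOuter_eq_findFrom (gas cost : List Int) (n : Nat) :
    ∀ (fuel i : Nat),
      aOuter gas cost n i fuel
        = findFrom (fun j => aInner gas cost n j (gas.getD j 0) 1 (n - 1)) i fuel := by
  intro fuel
  induction fuel with
  | zero => intro i; rfl
  | succ f ih => intro i; simp only [aOuter, findFrom, ih]

theorem findFrom_congr (f f' : Nat → Bool) :
    ∀ (fuel i : Nat), (∀ j, i ≤ j → j < i + fuel → f j = f' j) →
      findFrom f i fuel = findFrom f' i fuel := by
  intro fuel
  induction fuel with
  | zero => intro i _; rfl
  | succ fu ih =>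
    intro i h
    simp only [findFrom]
    rw [h i le_rfl (by omega), ih (i + 1) (fun j h1 h2 => h j (by omega) (by omega))]

-- ===== B-side =====
-- take-based prefix sum over pairs
def PZ (z : List (Int × Int)) (t : Nat) : Int := ((z.take t).map (fun gc => gc.1 - gc.2)).sum

theorem qAndTotal_fst (z : List (Int × Int)) :
    ∀ p, (qAndTotal z p).1
      = (List.range z.length).map (fun t => p + PZ z t - (z.getD t (0, 0)).2) := by
  induction z with
  | nil => intro p; simp [qAndTotal]
  | cons gc rest ih =>
    intro p
    obtain ⟨g, c⟩ := gc
    simp only [qAndTotal, List.length_cons, List.range_succ_eq_map, List.map_cons, List.map_map]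
    congr 1
    · simp [PZ]
    · rw [ih]
      apply List.map_congr_left
      intro t ht
      simp [PZ, List.take_succ_cons, Function.comp]
      ring

theorem qAndTotal_snd (z : List (Int × Int)) :
    ∀ p, (qAndTotal z p).2 = p + PZ z z.length := by
  induction z with
  | nil => intro p; simp [qAndTotal, PZ]
  | cons gc rest ih =>
    intro p
    obtain ⟨g, c⟩ := gc
    simp only [qAndTotal, ih, PZ, List.take_succ_cons, List.length_cons, List.map_cons,
      List.sum_cons]
    ring

-- suffix-minimum head decides the all-≥ test
theorem foldl_min_assoc : ∀ (l : List Int) (a b : Int),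
    min a (l.foldl min b) = l.foldl min (min a b) := by
  intro l
  induction l with
  | nil => intro a b; rfl
  | cons c cs ih =>
    intro a b
    simp only [List.foldl_cons]
    rw [ih, min_assoc]

theorem suf_head : ∀ l : List Int, (sufList l).headD none = l.min?
  | [] => by simp [sufList]
  | q :: rest => by
    simp only [sufList, List.headD_cons]
    rw [suf_head rest]
    cases rest with
    | nil => simp [List.min?]
    | cons r rs => simp [List.min?, List.foldl_cons, foldl_min_assoc]

theorem foldl_min_ge (x : Int) :
    ∀ (l : List Int) (q : Int), (l.foldl min q ≥ x ↔ q ≥ x ∧ ∀ y ∈ l, y ≥ x) := by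
  intro l
  induction l with
  | nil => intro q; simp
  | cons r rs ih =>
    intro q
    simp only [List.foldl_cons, ih, le_min_iff, List.mem_cons]
    constructor
    · rintro ⟨⟨h1, h2⟩, h3⟩
      exact ⟨h1, fun y hy => by rcases hy with rfl | hy; exact h2; exact h3 y hy⟩
    · rintro ⟨h1, h2⟩
      exact ⟨⟨h1, h2 r (Or.inl rfl)⟩, fun y hy => h2 y (Or.inr hy)⟩

theorem suf_ge (l : List Int) (x : Int) :
    (match (sufList l).headD none with
     | none => true
     | some m => decide (m ≥ x)) = decide (∀ y ∈ l, y ≥ x) := by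
  rw [suf_head]
  cases l with
  | nil => simp
  | cons q rest =>
    simp only [List.min?]
    apply decide_eq_decide.mpr
    rw [foldl_min_ge]
    simp only [List.mem_cons]
    constructor
    · rintro ⟨h1, h2⟩ y hy
      rcases hy with rfl | hy
      · exact h1
      · exact h2 y hy
    · intro h
      exact ⟨h q (Or.inl rfl), fun y hy => h y (Or.inr hy)⟩

-- bridges between z = gas.zip cost and the gas/cost functions
theorem zip_getD (gas cost : List Int) (t : Nat) (ht : t < gas.length)
    (hle : gas.length ≤ cost.length) :
    (gas.zip cost).getD t (0, 0) = (gF gas t, cF cost t) := by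
  have hz : t < (gas.zip cost).length := by simp [List.length_zip]; omega
  rw [List.getD_eq_getElem _ _ hz, List.getElem_zip]
  simp [gF, cF, List.getD_eq_getElem?_getD, List.getElem?_eq_getElem ht,
    List.getElem?_eq_getElem (show t < cost.length by omega)]

theorem PZ_eq_PF (gas cost : List Int) (hle : gas.length ≤ cost.length) :
    ∀ t, t ≤ gas.length → PZ (gas.zip cost) t = PF gas cost t := by
  intro t
  induction t with
  | zero => intro _; simp [PZ, PF]
  | succ t ih =>
    intro h
    have hz : t < (gas.zip cost).length := by simp [List.length_zip]; omega
    rw [PF_succ]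
    simp only [PZ, List.take_add_one, List.getElem?_eq_getElem hz]
    simp only [Option.toList_some, List.map_append, List.sum_append]
    rw [← PZ, ih (by omega)]
    have := zip_getD gas cost t (by omega) hle
    rw [List.getD_eq_getElem _ _ hz] at this
    simp [this, dF]

-- the Q list and total that B computes
def QL (gas cost : List Int) : List Int := (qAndTotal (gas.zip cost) 0).1
def TT (gas cost : List Int) : Int := (qAndTotal (gas.zip cost) 0).2

theorem QL_length (gas cost : List Int) (hle : gas.length ≤ cost.length) :
    (QL gas cost).length = gas.length := by
  simp [QL, qAndTotal_fst, List.length_zip]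
  omega

theorem QL_getD (gas cost : List Int) (hle : gas.length ≤ cost.length)
    (t : Nat) (ht : t < gas.length) :
    (QL gas cost).getD t 0 = QF gas cost t := by
  unfold QL
  rw [qAndTotal_fst]
  have hz : t < (gas.zip cost).length := by simp [List.length_zip]; omega
  rw [List.getD_eq_getElem _ _ (by simpa using hz)]
  simp only [List.getElem_map, List.getElem_range]
  rw [PZ_eq_PF gas cost hle t (by omega), zip_getD gas cost t ht hle]
  simp [QF]

theorem TT_eq (gas cost : List Int) (hle : gas.length ≤ cost.length) :
    TT gas cost = PF gas cost gas.length := by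
  unfold TT
  rw [qAndTotal_snd]
  rw [show (gas.zip cost).length = gas.length from by simp [List.length_zip]; omega]
  rw [PZ_eq_PF gas cost hle _ le_rfl]
  ring

theorem forall_mem_drop (l : List Int) (j : Nat) (Pp : Int → Prop) :
    (∀ y ∈ l.drop j, Pp y) ↔ (∀ t, j ≤ t → t < l.length → Pp (l.getD t 0)) := by
  constructor
  · intro h t h1 h2
    rw [List.getD_eq_getElem _ _ h2]
    have hd : t - j < (l.drop j).length := by simp; omega
    have he : (l.drop j)[t - j] = l[t] := by
      rw [List.getElem_drop]
      congr 1
      omega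
    have := List.getElem_mem hd
    rw [he] at this
    exact h _ this
  · intro h y hy
    obtain ⟨m, hm, rfl⟩ := List.mem_iff_getElem.mp hy
    rw [List.getElem_drop]
    have hlt : j + m < l.length := by simp at hm; omega
    have := h (j + m) (by omega) hlt
    rwa [List.getD_eq_getElem _ _ hlt] at this

-- B's main loop walks Q computing exactly findFrom over condB
theorem bLoop_spec (gas cost : List Int) (hle : gas.length ≤ cost.length) :
    ∀ (l : List Int) (k : Nat) (pm : Option Int),
      l = (QL gas cost).drop k →
      (∀ x : Int, (match pm with
                   | none => true
                   | some m => decide (TT gas cost + m ≥ x))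
        = decide (∀ t, t < k → PF gas cost gas.length + QF gas cost t ≥ x)) →
      bLoop l (sufList l).tail (TT gas cost) pm k
        = findFrom (fun i => condB gas cost gas.length i) k (gas.length - k) := by
  intro l
  induction l with
  | nil =>
    intro k pm hl hpm
    have : gas.length ≤ k := by
      have := congrArg List.length hl
      simp [QL_length gas cost hle] at this
      omega
    rw [show gas.length - k = 0 from by omega]
    rfl
  | cons q qs ih =>
    intro k pm hl hpm
    have hlen : (QL gas cost).length = gas.length := QL_length gas cost hle
    have hk : k < gas.length := by
      by_contra hc
      rw [List.drop_eq_nil_of_le (by omega)] at hl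
      simp at hl
    rw [List.drop_eq_getElem_cons (by omega : k < (QL gas cost).length),
      List.cons.injEq] at hl
    obtain ⟨hq0, hqs⟩ := hl
    have hq : q = QF gas cost k := by
      rw [hq0, ← List.getD_eq_getElem _ 0 (by omega), QL_getD gas cost hle k hk]
    subst hq
    have hsuf : (sufList (QF gas cost k :: qs)).tail = sufList qs := by simp [sufList]
    rw [hsuf]
    simp only [bLoop]
    have hc1 : (match (sufList qs).headD none with
                | none => true
                | some m => decide (m ≥ QF gas cost k))
        = decide (∀ t, t < gas.length → k < t → QF gas cost t ≥ QF gas cost k) := by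
      rw [suf_ge qs (QF gas cost k), hqs]
      apply decide_eq_decide.mpr
      rw [forall_mem_drop]
      constructor
      · intro h t h1 h2
        have := h t (by omega) (by omega)
        rwa [QL_getD gas cost hle t h1] at this
      · intro h t h1 h2
        rw [QL_getD gas cost hle t (by omega)]
        exact h t (by omega) (by omega)
    have hc2 := hpm (QF gas cost k)
    rw [hc1, hc2, ← Bool.decide_and,
      show (decide ((∀ t, t < gas.length → k < t → QF gas cost t ≥ QF gas cost k) ∧
          (∀ t, t < k → PF gas cost gas.length + QF gas cost t ≥ QF gas cost k)))
        = condB gas cost gas.length k from rfl]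
    rw [show gas.length - k = (gas.length - (k + 1)) + 1 from by omega]
    simp only [findFrom]
    by_cases hcb : condB gas cost gas.length k = true
    · rw [if_pos hcb, if_pos hcb]
    · rw [if_neg hcb, if_neg hcb]
      refine ih (k + 1) _ hqs ?_
      intro x
      have hTT := TT_eq gas cost hle
      cases pm with
      | none =>
        have hprev : ∀ t, t < k → PF gas cost gas.length + QF gas cost t ≥ x :=
          of_decide_eq_true (hpm x).symm
        show decide (TT gas cost + QF gas cost k ≥ x)
          = decide (∀ t, t < k + 1 → PF gas cost gas.length + QF gas cost t ≥ x)
        apply decide_eq_decide.mpr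
        constructor
        · intro h t ht
          rcases Nat.lt_succ_iff_lt_or_eq.mp ht with h' | rfl
          · exact hprev t h'
          · omega
        · intro h
          have := h k (by omega)
          omega
      | some m =>
        have h1 : (TT gas cost + m ≥ x)
            ↔ (∀ t, t < k → PF gas cost gas.length + QF gas cost t ≥ x) :=
          decide_eq_decide.mp (hpm x)
        show decide (TT gas cost + min m (QF gas cost k) ≥ x)
          = decide (∀ t, t < k + 1 → PF gas cost gas.length + QF gas cost t ≥ x)
        apply decide_eq_decide.mpr
        constructor
        · intro h t ht
          have hm : TT gas cost + m ≥ x ∧ TT gas cost + QF gas cost k ≥ x := by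
            rcases le_total m (QF gas cost k) with hmq | hmq
            · rw [min_eq_left hmq] at h; omega
            · rw [min_eq_right hmq] at h; omega
          rcases Nat.lt_succ_iff_lt_or_eq.mp ht with h' | rfl
          · exact h1.mp hm.1 t h'
          · omega
        · intro h
          have hm1 : TT gas cost + m ≥ x := h1.mpr (fun t ht => h t (by omega))
          have hm2 : PF gas cost gas.length + QF gas cost k ≥ x := h k (by omega)
          rcases le_total m (QF gas cost k) with hmq | hmq
          · rw [min_eq_left hmq]; omega
          · rw [min_eq_right hmq]; omega


-- ===== assembling =====
theorem brute_force_wrong_traverse_spec : Claim_equal_brute_force_wrong_traverse := by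
  intro gas cost _ hpre
  unfold Pre_brute_force_wrong_traverse at hpre
  unfold Spec_brute_force_wrong_traverse
  have hA : brute_force_wrong_traverse gas cost
      = findFrom (fun i => condB gas cost gas.length i) 0 gas.length := by
    unfold brute_force_wrong_traverse
    rw [aOuter_eq_findFrom]
    apply findFrom_congr
    intro j hj1 hj2
    exact aInner_cond gas cost gas.length j rfl (by omega)
  have hB : brute_force_wrong_traverse_alt gas cost
      = findFrom (fun i => condB gas cost gas.length i) 0 gas.length := by
    unfold brute_force_wrong_traverse_alt
    have := bLoop_spec gas cost hpre (QL gas cost) 0 none rfl (by intro x; simp)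
    simpa [QL, TT] using this
  rw [hA, hB]
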